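-- pv_equiv track=rewrite | github.com/elmarc0/Shift-and | main.py | dicionario
-- ===== SOURCE A (Python) =====
-- def dicionario(palavra):#função que cria um dicionario, com todas a s letras da palavra, e um lista com as ocorrencias delas
--   mat = {}
--   for i in palavra:
--     ocorrencia = []
--     for j in palavra:
--       if i == j:
--         ocorrencia.append(True)
--       else:
--         ocorrencia.append(False)
--     mat[i] = ocorrencia
--
--   return mat
-- ===== SOURCE B (Python) =====
-- def dicionario(palavra):
--     n = len(palavra)
--     mat = {}
--     for i, c in enumerate(palavra):
--         if c not in mat:
--             mat[c] = [False] * n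
--         mat[c][i] = True
--     return mat
-- ===== Notes on version B (the rewrite author's own statement) =====
-- stated objective: faster
-- what changed: Single enumerate pass scattering True into pre-zeroed [False]*n masks (one fresh mask per distinct char), instead of rebuilding the full mask by an inner scan for every character of the word.
import Mathlib
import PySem

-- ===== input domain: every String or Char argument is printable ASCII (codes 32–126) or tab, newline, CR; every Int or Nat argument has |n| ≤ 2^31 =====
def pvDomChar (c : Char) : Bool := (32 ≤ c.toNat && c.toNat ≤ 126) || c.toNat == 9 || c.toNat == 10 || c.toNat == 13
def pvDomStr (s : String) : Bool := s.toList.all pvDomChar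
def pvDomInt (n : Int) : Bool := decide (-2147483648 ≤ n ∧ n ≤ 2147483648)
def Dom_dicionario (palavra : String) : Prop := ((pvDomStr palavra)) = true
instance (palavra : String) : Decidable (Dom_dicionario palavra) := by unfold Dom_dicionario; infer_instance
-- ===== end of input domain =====

-- B replaces A's per-character inner scan by a single enumerate pass that scatters True into pre-zeroed masks (return value only; timing run: measurably faster).


-- ===== PORT A =====
def dicionario (palavra : String) : List (String × List Bool) :=
  (palavra.toList.foldl (fun mat i =>
      mat.insert (String.singleton i)
        (palavra.toList.foldl (fun oc j =>
            if i = j then oc ++ [true] else oc ++ [false]) []))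
    PySem.Dict.empty).items

-- ===== PORT B =====
def dicionario_alt (palavra : String) : List (String × List Bool) :=
  let n := palavra.toList.length
  ((PySem.List.enumerate palavra.toList 0).foldl (fun mat p =>
      let c := String.singleton p.2
      let mat := if mat.contains c then mat else mat.insert c (List.replicate n false)
      mat.insert c (PySem.List.pySetD (mat.getD c []) p.1 true))
    PySem.Dict.empty).items

-- ===== PRECONDITION & SPEC =====
def Spec_dicionario (palavra : String) (out : List (String × List Bool)) : Prop := out = dicionario_alt palavra
instance (palavra : String) (out : List (String × List Bool)) : Decidable (Spec_dicionario palavra out) := by unfold Spec_dicionario; infer_instance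

-- ===== CLAIM (what is proved, stated in full; the proofs are below) =====
def Claim_equal_dicionario : Prop := ∀ (palavra : String), Dom_dicionario palavra → Spec_dicionario palavra (dicionario palavra)

-- ===== LEMMAS AND PROOFS =====

-- the boolean mask of character c over the word: A's inner loop builds it, B ends with it
def pvMask (w : List Char) (c : Char) : List Bool := w.map fun j => decide (c = j)

-- B's mask for c after the first m positions have been processed
def pvMaskUpTo (w : List Char) (m : Nat) (c : Char) : List Bool :=
  (w.take m).map (fun j => decide (c = j)) ++ List.replicate (w.length - m) false

lemma singleton_inj : Function.Injective String.singleton := by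
  intro a b h
  have := congrArg String.toList h
  simpa using this

lemma set_len_append {α : Type} (A : List α) (b v : α) (B : List α) (m : Nat)
    (h : A.length = m) : (A ++ b :: B).set m v = A ++ v :: B := by subst h; simp

lemma inner_loop (i : Char) (w : List Char) (acc : List Bool) :
    w.foldl (fun oc j => if i = j then oc ++ [true] else oc ++ [false]) acc
      = acc ++ w.map (fun j => decide (i = j)) := by
  have h : (fun (oc : List Bool) (j : Char) => if i = j then oc ++ [true] else oc ++ [false])
      = fun oc j => oc ++ [decide (i = j)] := by
    funext oc j; by_cases h : i = j <;> simp [h]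
  rw [h, PySem.List.foldl_append_singleton_eq_map]

lemma keys_of_items (d : PySem.Dict String (List Bool)) (p : List Char)
    (f : Char → List Bool)
    (hd : d.items = (PySem.Set.ofList p).map fun c => (String.singleton c, f c)) :
    d.keys = (PySem.Set.ofList p).map String.singleton := by
  simp only [PySem.Dict.keys, hd, List.map_map]
  rfl

lemma contains_iff_mem (d : PySem.Dict String (List Bool)) (p : List Char)
    (f : Char → List Bool)
    (hd : d.items = (PySem.Set.ofList p).map fun c => (String.singleton c, f c)) (i : Char) :
    d.contains (String.singleton i) = decide (i ∈ p) := by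
  rw [PySem.Dict.contains_eq_decide_mem_keys, keys_of_items d p f hd]
  by_cases h : i ∈ p <;>
    simp [List.mem_map, singleton_inj.eq_iff, PySem.Set.mem_ofList, h]

lemma maskUpTo_len (w : List Char) (c : Char) :
    pvMaskUpTo w w.length c = pvMask w c := by
  simp [pvMaskUpTo, pvMask]

lemma maskUpTo_succ_ne (w : List Char) (m : Nat) (hm : m < w.length) (c : Char)
    (hc : c ≠ w[m]) : pvMaskUpTo w (m + 1) c = pvMaskUpTo w m c := by
  unfold pvMaskUpTo
  have hr : w.length - m = (w.length - (m+1)) + 1 := by omega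
  rw [List.take_succ_eq_append_getElem hm, hr, List.replicate_succ, List.map_append]
  simp [hc]

lemma maskUpTo_succ_set (w : List Char) (m : Nat) (hm : m < w.length) :
    (pvMaskUpTo w m w[m]).set m true = pvMaskUpTo w (m + 1) w[m] := by
  unfold pvMaskUpTo
  have hr : w.length - m = (w.length - (m+1)) + 1 := by omega
  rw [List.take_succ_eq_append_getElem hm, hr, List.replicate_succ, List.map_append,
    set_len_append _ _ _ _ _ (by simp [Nat.min_eq_left (Nat.le_of_lt hm)])]
  simp

lemma maskUpTo_fresh (w : List Char) (m : Nat) (hm : m ≤ w.length) (c : Char)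
    (hc : c ∉ w.take m) : pvMaskUpTo w m c = List.replicate w.length false := by
  unfold pvMaskUpTo
  have h1 : (w.take m).map (fun j => decide (c = j)) = List.replicate (w.take m).length false :=
    List.map_eq_replicate_iff.mpr (by intro x hx; simp; rintro rfl; exact hc hx)
  rw [h1, ← List.replicate_add]
  congr 1
  simp [Nat.min_eq_left hm]
  omega

-- invariant of A's outer loop: the dict maps each seen char to its full mask
lemma A_inv (cs : List Char) (l p : List Char) (d : PySem.Dict String (List Bool))
    (hd : d.items = (PySem.Set.ofList p).map fun c => (String.singleton c, pvMask cs c)) :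
    (l.foldl (fun mat i => mat.insert (String.singleton i) (pvMask cs i)) d).items
      = (PySem.Set.ofList (p ++ l)).map fun c => (String.singleton c, pvMask cs c) := by
  induction l generalizing p d with
  | nil => simpa using hd
  | cons i l ih =>
    have hcont := contains_iff_mem d p _ hd i
    have hstep : (d.insert (String.singleton i) (pvMask cs i)).items
        = (PySem.Set.ofList (p ++ [i])).map fun c => (String.singleton c, pvMask cs c) := by
      by_cases h : i ∈ p
      · rw [PySem.Dict.items_insert_of_contains _ _ (by simp [hcont, h]), hd,
          PySem.Set.ofList_append_singleton, PySem.Set.add_of_mem (by simp [PySem.Set.mem_ofList, h]),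
          List.map_map]
        apply List.map_congr_left
        intro c hc
        by_cases hci : c = i
        · subst hci; simp
        · simp [singleton_inj.eq_iff, hci]
      · rw [PySem.Dict.items_insert_of_not_contains _ _ (by simp [hcont, h]), hd,
          PySem.Set.ofList_append_singleton, PySem.Set.add_of_not_mem (by simp [PySem.Set.mem_ofList, h]),
          List.map_append]
        rfl
    have := ih (p ++ [i]) _ hstep
    simpa [List.append_assoc] using this

-- invariant of B's loop, over the suffix starting at position m
lemma B_inv (k : Nat) (w : List Char) (m : Nat) (hk : w.length - m = k) (hm : m ≤ w.length)
    (d : PySem.Dict String (List Bool))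
    (hd : d.items = (PySem.Set.ofList (w.take m)).map fun c => (String.singleton c, pvMaskUpTo w m c)) :
    ((PySem.List.enumerate (w.drop m) m).foldl (fun mat p =>
        let c := String.singleton p.2
        let mat := if mat.contains c then mat else mat.insert c (List.replicate w.length false)
        mat.insert c (PySem.List.pySetD (mat.getD c []) p.1 true)) d).items
      = (PySem.Set.ofList w).map fun c => (String.singleton c, pvMask w c) := by
  induction k generalizing m d with
  | zero =>
    have hme : m = w.length := by omega
    subst hme
    rw [List.drop_length]
    simp only [PySem.List.enumerate_nil, List.foldl_nil]
    rw [hd, List.take_length]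
    simp only [maskUpTo_len]
  | succ k ih =>
    have hlt : m < w.length := by omega
    have hnd : d.keys.Nodup := by
      rw [keys_of_items d (w.take m) _ hd]
      exact (PySem.Set.nodup_ofList _).map singleton_inj
    have hcont := contains_iff_mem d (w.take m) _ hd w[m]
    rw [List.drop_eq_getElem_cons hlt, PySem.List.enumerate_cons, List.foldl_cons]
    have hd' : ∀ d' : PySem.Dict String (List Bool),
        d'.items = (PySem.Set.ofList (w.take (m+1))).map
          (fun c => (String.singleton c, pvMaskUpTo w (m+1) c)) →
        ((PySem.List.enumerate (w.drop (m+1)) ((m : Int) + 1)).foldl (fun mat p =>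
            let c := String.singleton p.2
            let mat := if mat.contains c then mat else mat.insert c (List.replicate w.length false)
            mat.insert c (PySem.List.pySetD (mat.getD c []) p.1 true)) d').items
          = (PySem.Set.ofList w).map fun c => (String.singleton c, pvMask w c) := by
      intro d' h
      have := ih (m+1) (by omega) (by omega) d' h
      simpa [Nat.cast_add] using this
    by_cases h : w[m] ∈ w.take m
    · -- key already present: only its mask is updated at position m
      apply hd'
      simp only [hcont, h, decide_true, if_true]
      have hmem : (String.singleton w[m], pvMaskUpTo w m w[m]) ∈ d.items := by
        rw [hd]
        exact List.mem_map_of_mem (by simp [PySem.Set.mem_ofList, h])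
      rw [PySem.Dict.getD_of_mem_items d hmem hnd]
      rw [show PySem.List.pySetD (pvMaskUpTo w m w[m]) (m : Int) true
            = (pvMaskUpTo w m w[m]).set m true from by simp,
        maskUpTo_succ_set w m hlt]
      rw [PySem.Dict.items_insert_of_contains _ _ (by simp [hcont, h]), hd, List.map_map]
      rw [List.take_succ_eq_append_getElem hlt, PySem.Set.ofList_append_singleton,
        PySem.Set.add_of_mem (by simp [PySem.Set.mem_ofList, h])]
      apply List.map_congr_left
      intro c hc
      by_cases hci : c = w[m]
      · subst hci; simp
      · simp only [Function.comp_apply]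
        rw [maskUpTo_succ_ne w m hlt c hci]
        simp [singleton_inj.eq_iff, hci]
    · -- fresh key: a pre-zeroed mask is inserted, then position m is set
      apply hd'
      simp only [hcont, h, decide_false, Bool.false_eq_true, if_false]
      rw [PySem.Dict.getD_insert_self, PySem.Dict.insert_insert_self]
      rw [show PySem.List.pySetD (List.replicate w.length false) (m : Int) true
            = (List.replicate w.length false).set m true from by simp]
      rw [← maskUpTo_fresh w m (by omega) w[m] h, maskUpTo_succ_set w m hlt]
      rw [PySem.Dict.items_insert_of_not_contains _ _ (by simp [hcont, h]), hd]
      rw [List.take_succ_eq_append_getElem hlt, PySem.Set.ofList_append_singleton,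
        PySem.Set.add_of_not_mem (by simp [PySem.Set.mem_ofList, h]), List.map_append]
      congr 1
      apply List.map_congr_left
      intro c hc
      have hci : c ≠ w[m] := by
        rintro rfl; exact h (by simpa [PySem.Set.mem_ofList] using hc)
      rw [maskUpTo_succ_ne w m hlt c hci]

-- ===== VERDICT (by name: the statement is the Claim_ definition above) =====
theorem dicionario_spec : Claim_equal_dicionario := by
  intro palavra _
  unfold Spec_dicionario dicionario dicionario_alt
  have hA : ∀ i, palavra.toList.foldl
      (fun oc j => if i = j then oc ++ [true] else oc ++ [false]) []
        = pvMask palavra.toList i := fun i => by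
    simpa [pvMask] using inner_loop i palavra.toList []
  calc (palavra.toList.foldl (fun mat i =>
          mat.insert (String.singleton i)
            (palavra.toList.foldl (fun oc j =>
              if i = j then oc ++ [true] else oc ++ [false]) []))
        PySem.Dict.empty).items
      = (PySem.Set.ofList palavra.toList).map
          (fun c => (String.singleton c, pvMask palavra.toList c)) := by
        simp only [hA]
        simpa using A_inv palavra.toList palavra.toList [] PySem.Dict.empty (by rfl)
    _ = _ := by
        have := B_inv palavra.toList.length palavra.toList 0 (by omega) (Nat.zero_le _)
          PySem.Dict.empty (by rfl)
        simp only [List.drop_zero, Nat.cast_zero] at this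
        exact this.symm
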